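-- pv_equiv track=rewrite | github.com/yutaokkots/Algorithms-and-Data-Structures | data_structures_and_algorithms/Problems/leetcode/_0080_removeDuplicatesII.py | removeDuplicates1
-- ===== SOURCE A (Python) =====
-- from typing import List
--
-- def removeDuplicates1(nums: List[int]) -> int:
--     if len(nums) == 1:
--         return 1
--     length = len(nums) - 1
--     for i in range(length, -1, -1):
--         if i == length:
--             continue
--         if i == 0:
--             break
--         if i == 1 and nums[i] == nums[i+1] == nums[i-1]:
--             nums.pop(i+1)
--             break
--         else:
--             if nums[i] == nums[i+1] == nums[i-1]:
--                 nums.pop(i+1)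
--     return len(nums)
-- ===== SOURCE B (Python) =====
-- def removeDuplicates1(nums):
--     n = len(nums)
--     dup = sum(1 for i in range(1, n - 1) if nums[i - 1] == nums[i] == nums[i + 1])
--     return n - dup
-- ===== Notes on version B (the rewrite author's own statement) =====
-- stated objective: faster
-- what changed: A scans the list right-to-left calling list.pop (an O(n) shift each time) for every interior run of three equal values; B computes the same count in one read-only pass, returning len(nums) minus the number of indices i with nums[i-1] == nums[i] == nums[i+1].
import Mathlib
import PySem

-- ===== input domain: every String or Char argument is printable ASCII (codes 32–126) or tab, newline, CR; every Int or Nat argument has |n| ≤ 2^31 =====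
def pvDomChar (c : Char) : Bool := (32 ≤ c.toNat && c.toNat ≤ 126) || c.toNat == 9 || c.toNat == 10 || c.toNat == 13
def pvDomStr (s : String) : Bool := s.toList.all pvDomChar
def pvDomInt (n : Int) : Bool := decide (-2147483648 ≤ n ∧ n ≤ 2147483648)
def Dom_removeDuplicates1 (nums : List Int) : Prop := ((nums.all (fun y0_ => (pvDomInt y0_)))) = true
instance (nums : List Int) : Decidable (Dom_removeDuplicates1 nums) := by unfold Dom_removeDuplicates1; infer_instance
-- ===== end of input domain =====

-- B replaces A's reverse scan with repeated list.pop mutations by a single read-only pass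
-- counting interior equal triples (A mutates nums in place, B does not — the equivalence
-- proved here is about the RETURN value only).

-- ===== PORT A =====
-- A's reverse for-loop; the state is the (mutated) list; whenever a pop/read branch fires its
-- index is provably in range, so pyGetD's default and pop?'s none-fallback are never used
def loopA : List Int → Int → List Int → List Int
  | [], _, ns => ns
  | i :: rest, length, ns =>
    if i = length then loopA rest length ns
    else if i = 0 then ns
    else if i = 1 ∧ PySem.List.pyGetD ns i 0 = PySem.List.pyGetD ns (i+1) 0 ∧
              PySem.List.pyGetD ns (i+1) 0 = PySem.List.pyGetD ns (i-1) 0 then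
      match PySem.List.pop? ns (i+1) with
      | some (_, ns') => ns'
      | none => ns
    else if PySem.List.pyGetD ns i 0 = PySem.List.pyGetD ns (i+1) 0 ∧
              PySem.List.pyGetD ns (i+1) 0 = PySem.List.pyGetD ns (i-1) 0 then
      match PySem.List.pop? ns (i+1) with
      | some (_, ns') => loopA rest length ns'
      | none => loopA rest length ns
    else loopA rest length ns


def removeDuplicates1 (nums : List Int) : Int :=
  if nums.length = 1 then 1
  else
    let length : Int := (nums.length : Int) - 1
    ((loopA (PySem.List.pyRange length (-1) (-1)) length nums).length : Int)


-- ===== PORT B =====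
-- the triple test of Source B's generator expression
def tripB (nums : List Int) (i : Int) : Bool :=
  (PySem.List.pyGetD nums (i-1) 0 == PySem.List.pyGetD nums i 0) &&
  (PySem.List.pyGetD nums i 0 == PySem.List.pyGetD nums (i+1) 0)


def removeDuplicates1_alt (nums : List Int) : Int :=
  let n : Int := (nums.length : Int)
  let dup : Int := ((PySem.List.pyRange 1 (n - 1) 1).countP (tripB nums) : Int)
  n - dup


-- ===== PRECONDITION & SPEC =====
def Spec_removeDuplicates1 (nums : List Int) (out : Int) : Prop := out = removeDuplicates1_alt nums
instance (nums : List Int) (out : Int) : Decidable (Spec_removeDuplicates1 nums out) := by unfold Spec_removeDuplicates1; infer_instance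

-- ===== CLAIM (what is proved, stated in full; the proofs are below) =====
def Claim_equal_removeDuplicates1 : Prop := ∀ (nums : List Int), Dom_removeDuplicates1 nums → Spec_removeDuplicates1 nums (removeDuplicates1 nums)

-- ===== LEMMAS AND PROOFS =====

theorem pyGetD_eraseIdx_lt (ns : List Int) (p q : Nat) (hq : q < p) :
    PySem.List.pyGetD (ns.eraseIdx p) (q:Int) 0 = PySem.List.pyGetD ns (q:Int) 0 := by
  simp only [PySem.List.pyGetD_natCast]
  unfold List.getD
  rw [List.getElem?_eraseIdx_of_lt hq]

theorem tripB_eraseIdx (ns : List Int) (p : Nat) (j : Int) (h1 : 1 ≤ j) (h2 : j + 1 < (p:Int)) :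
    tripB (ns.eraseIdx p) j = tripB ns j := by
  obtain ⟨k, rfl⟩ : ∃ k : Nat, j = (k:Int) := ⟨j.toNat, by omega⟩
  have e1 : (k:Int) - 1 = ((k-1 : Nat) : Int) := by omega
  have e2 : (k:Int) + 1 = ((k+1 : Nat) : Int) := by push_cast; ring
  unfold tripB
  rw [e1, e2, pyGetD_eraseIdx_lt ns p (k-1) (by omega), pyGetD_eraseIdx_lt ns p k (by omega),
      pyGetD_eraseIdx_lt ns p (k+1) (by omega)]

-- A's chained condition at index i equals B's triple test

theorem tripB_iff (ns : List Int) (i : Int) :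
    (PySem.List.pyGetD ns i 0 = PySem.List.pyGetD ns (i+1) 0 ∧
     PySem.List.pyGetD ns (i+1) 0 = PySem.List.pyGetD ns (i-1) 0) ↔ tripB ns i = true := by
  simp only [tripB, Bool.and_eq_true, beq_iff_eq]
  constructor
  · rintro ⟨h1, h2⟩; exact ⟨(h1.trans h2).symm, h1⟩
  · rintro ⟨h1, h2⟩; exact ⟨h2, h2.symm.trans h1.symm⟩

theorem loop_len (i : Nat) : ∀ (ns : List Int) (len : Int), (i : Int) < len → i + 2 ≤ ns.length →
    ((loopA (PySem.List.pyRange (i : Int) (-1) (-1)) len ns).length : Int)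
      = (ns.length : Int) - ((PySem.List.pyRange 1 ((i : Int) + 1) 1).countP (tripB ns) : Int) := by
  induction i with
  | zero =>
    intro ns len hlt _
    push_cast
    rw [PySem.List.pyRange_neg_one_cons (by omega)]
    rw [(by ring : (0:Int) - 1 = -1), PySem.List.pyRange_neg_one_eq_nil le_rfl]
    rw [show PySem.List.pyRange 1 1 1 = [] from PySem.List.pyRange_one_eq_nil le_rfl]
    simp [loopA]
  | succ i ih =>
    intro ns len hlt hlen
    push_cast
    have hlt' : (i:Int) + 1 < len := by push_cast at hlt; omega
    rw [PySem.List.pyRange_neg_one_cons (by omega)]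
    rw [(by ring : (i:Int) + 1 - 1 = (i:Int))]
    have hpop : PySem.List.pop? ns (((i:Int)+1)+1) = some (ns[i+2]'(by omega), ns.eraseIdx (i+2)) := by
      rw [(by push_cast; ring : ((i:Int)+1)+1 = ((i+2:Nat):Int))]
      exact PySem.List.pop?_natCast ns (i+2) (by omega)
    have hE : (ns.eraseIdx (i+2)).length = ns.length - 1 :=
      List.length_eraseIdx_of_lt (by omega)
    have hsplit : PySem.List.pyRange 1 (((i:Int)+1) + 1) 1
        = PySem.List.pyRange 1 ((i:Int) + 1) 1 ++ [(i:Int)+1] :=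
      PySem.List.pyRange_one_succ_right (by omega)
    by_cases hT : PySem.List.pyGetD ns ((i:Int)+1) 0 = PySem.List.pyGetD ns (((i:Int)+1)+1) 0 ∧
        PySem.List.pyGetD ns (((i:Int)+1)+1) 0 = PySem.List.pyGetD ns (((i:Int)+1)-1) 0
    · have htrip : tripB ns ((i:Int)+1) = true := (tripB_iff ns _).mp hT
      by_cases h1 : ((i:Int)+1) = 1
      · -- i = 0: third branch, pop and break
        have hi0 : i = 0 := by omega
        subst hi0
        simp only [loopA]
        norm_num at hpop hE hsplit htrip hT ⊢
        rw [if_neg (by omega : ¬ (1:Int) = len), if_pos hT, hpop]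
        rw [hsplit]
        simp [htrip, hE]
        omega
      · -- fourth branch: pop and continue
        simp only [loopA]
        rw [if_neg (by omega : ¬ ((i:Int)+1 = len)), if_neg (by omega), if_neg (by tauto),
            if_pos hT, hpop]
        rw [ih (ns.eraseIdx (i+2)) len (by omega) (by omega)]
        have hcongr : (PySem.List.pyRange 1 ((i:Int) + 1) 1).countP (tripB (ns.eraseIdx (i+2)))
            = (PySem.List.pyRange 1 ((i:Int) + 1) 1).countP (tripB ns) := by
          apply List.countP_congr
          intro j hj
          have hm := (PySem.List.mem_pyRange_one).mp hj
          rw [tripB_eraseIdx ns (i+2) j hm.1 (by push_cast; omega)]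
        rw [hcongr, hsplit, List.countP_append]
        simp [htrip, hE]
        omega
    · -- no triple: skip
      have htrip : tripB ns ((i:Int)+1) = false := by
        cases h : tripB ns ((i:Int)+1)
        · rfl
        · exact absurd ((tripB_iff ns _).mpr h) hT
      simp only [loopA]
      rw [if_neg (by omega : ¬ ((i:Int)+1 = len)), if_neg (by omega), if_neg (by tauto),
          if_neg hT]
      rw [ih ns len (by omega) (by omega), hsplit, List.countP_append]
      simp [htrip]

theorem main_eq (nums : List Int) : removeDuplicates1 nums = removeDuplicates1_alt nums := by
  unfold removeDuplicates1 removeDuplicates1_alt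
  dsimp only
  by_cases h1 : nums.length = 1
  · rw [if_pos h1, h1]
    simp only [Nat.cast_one]
    rw [show PySem.List.pyRange 1 ((1:Int)-1) 1 = [] from PySem.List.pyRange_one_eq_nil (by omega)]
    simp
  · rw [if_neg h1]
    rcases Nat.eq_zero_or_pos nums.length with h0 | hpos
    · rw [h0]
      simp only [Nat.cast_zero]
      rw [show PySem.List.pyRange ((0:Int)-1) (-1) (-1) = [] from
            PySem.List.pyRange_neg_one_eq_nil (by omega)]
      rw [show PySem.List.pyRange 1 ((0:Int)-1) 1 = [] from PySem.List.pyRange_one_eq_nil (by omega)]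
      have hnil : nums = [] := List.length_eq_zero_iff.mp h0
      simp [loopA, hnil]
    · have h2 : 2 ≤ nums.length := by omega
      rw [PySem.List.pyRange_neg_one_cons (by omega : (-1:Int) < (nums.length:Int)-1)]
      simp only [loopA, if_true]
      rw [show (nums.length:Int)-1-1 = ((nums.length-2 : Nat):Int) by omega]
      rw [loop_len (nums.length-2) nums ((nums.length:Int)-1) (by omega) (by omega)]
      rw [show ((nums.length-2 : Nat):Int)+1 = (nums.length:Int)-1 by omega]

-- ===== VERDICT (by name: the statement is the Claim_ definition above) =====
theorem removeDuplicates1_spec : Claim_equal_removeDuplicates1 := by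
  unfold Claim_equal_removeDuplicates1 Spec_removeDuplicates1
  exact fun nums _ => main_eq nums
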